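-- pv_equiv track=rewrite | github.com/jca225/Trading_Strategy | main.py | hsp_asi
-- ===== SOURCE A (Python) =====
-- def hsp_asi(df, list1):
--         list2 = [0] * len(list1)
--
--         for i in range(len(list1)):
--             if i == len(list1) - 1:
--                 continue
--             if (list1[i] > list1[i-1] and list1[i] > list1[i+1]):
--                 list2[i] = list1[i]
--                 for j in range(1, (len(list1) - i)):  #7,4
--                     if i+j == len(list1) - 1:
--                         continue
--                     if (list1[i + j] > list1[i + j - 1] and list1[i + j] > list1[i + j + 1]):
--                         #n = 0
--                         break
--                     else:
--                         list2[i+j] = list1[i]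
--         return list2
-- ===== SOURCE B (Python) =====
-- def hsp_asi(df, list1):
--     # Single left-to-right pass: carry the most recent peak value and forward-fill.
--     # (The peak test at i == 0 uses list1[-1], exactly as in the natural Python idiom.)
--     out = []
--     cur = 0
--     for i in range(len(list1) - 1):
--         if list1[i] > list1[i-1] and list1[i] > list1[i+1]:
--             cur = list1[i]
--         out.append(cur)
--     if list1:
--         out.append(0)
--     return out
-- ===== Notes on version B (the rewrite author's own statement) =====
-- stated objective: simpler
-- what changed: A restarts a nested forward-fill scan from every peak (writing into a preallocated array until the next peak); B is a single left-to-right pass that carries the value of the most recent peak and appends it at every position, with 0 at the last slot.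
import Mathlib
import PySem

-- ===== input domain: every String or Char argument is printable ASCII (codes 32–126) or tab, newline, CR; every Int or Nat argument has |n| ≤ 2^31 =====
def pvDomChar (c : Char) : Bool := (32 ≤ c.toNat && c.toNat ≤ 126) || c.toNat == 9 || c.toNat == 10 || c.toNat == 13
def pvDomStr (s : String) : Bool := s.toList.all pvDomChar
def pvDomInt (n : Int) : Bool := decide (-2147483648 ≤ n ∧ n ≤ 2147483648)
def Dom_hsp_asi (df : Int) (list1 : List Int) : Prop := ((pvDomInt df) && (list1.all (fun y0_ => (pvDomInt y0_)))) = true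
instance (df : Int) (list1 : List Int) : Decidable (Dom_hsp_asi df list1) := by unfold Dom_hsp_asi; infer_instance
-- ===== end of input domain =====

-- B replaces A's nested peak-then-forward-fill rescan by a single left-to-right
-- pass that carries the most recent peak value (one traversal instead of nested ones).

-- ===== PORT A =====
-- inner 'for j in range(1, len(list1)-i)' loop with continue/break; all indexing is
-- exact via pyGetD/pySetD (every index A uses is in range, incl. the i-1 wraparound at i=0)
def hspAInner (list1 : List Int) (i : Int) (js : List Int) (list2 : List Int) : List Int :=
  match js with
  | [] => list2
  | j :: rest =>
    if i + j = PySem.List.len list1 - 1 then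
      hspAInner list1 i rest list2                      -- continue
    else if PySem.List.pyGetD list1 (i + j) 0 > PySem.List.pyGetD list1 (i + j - 1) 0 ∧
            PySem.List.pyGetD list1 (i + j) 0 > PySem.List.pyGetD list1 (i + j + 1) 0 then
      list2                                             -- break
    else
      hspAInner list1 i rest (PySem.List.pySetD list2 (i + j) (PySem.List.pyGetD list1 i 0))

-- outer 'for i in range(len(list1))' loop
def hspAOuter (list1 : List Int) (is_ : List Int) (list2 : List Int) : List Int :=
  match is_ with
  | [] => list2
  | i :: rest =>
    if i = PySem.List.len list1 - 1 then
      hspAOuter list1 rest list2                        -- continue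
    else if PySem.List.pyGetD list1 i 0 > PySem.List.pyGetD list1 (i - 1) 0 ∧
            PySem.List.pyGetD list1 i 0 > PySem.List.pyGetD list1 (i + 1) 0 then
      hspAOuter list1 rest
        (hspAInner list1 i (PySem.List.pyRange 1 (PySem.List.len list1 - i) 1)
          (PySem.List.pySetD list2 i (PySem.List.pyGetD list1 i 0)))
    else
      hspAOuter list1 rest list2

def hsp_asi (df : Int) (list1 : List Int) : List Int :=
  hspAOuter list1 (PySem.List.pyRange 0 (PySem.List.len list1) 1)
    (List.replicate list1.length 0)                     -- list2 = [0]*len(list1)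

-- ===== PORT B =====
-- single pass: cur = value of the most recent peak so far (0 before any peak)
def hspBLoop (list1 : List Int) (is_ : List Int) (cur : Int) (out : List Int) : List Int :=
  match is_ with
  | [] => out
  | i :: rest =>
    if PySem.List.pyGetD list1 i 0 > PySem.List.pyGetD list1 (i - 1) 0 ∧
       PySem.List.pyGetD list1 i 0 > PySem.List.pyGetD list1 (i + 1) 0 then
      hspBLoop list1 rest (PySem.List.pyGetD list1 i 0) (out ++ [PySem.List.pyGetD list1 i 0])
    else
      hspBLoop list1 rest cur (out ++ [cur])

def hsp_asi_alt (df : Int) (list1 : List Int) : List Int :=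
  let out := hspBLoop list1 (PySem.List.pyRange 0 (PySem.List.len list1 - 1) 1) 0 []
  if list1 = [] then out else out ++ [0]                -- 'if list1: out.append(0)'

-- ===== PRECONDITION & SPEC =====
def Spec_hsp_asi (df : Int) (list1 : List Int) (out : List Int) : Prop := out = hsp_asi_alt df list1
instance (df : Int) (list1 : List Int) (out : List Int) : Decidable (Spec_hsp_asi df list1 out) := by unfold Spec_hsp_asi; infer_instance

-- ===== CLAIM (what is proved, stated in full; the proofs are below) =====
def Claim_equal_hsp_asi : Prop := ∀ (df : Int) (list1 : List Int), Dom_hsp_asi df list1 → Spec_hsp_asi df list1 (hsp_asi df list1)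

-- ===== LEMMAS AND PROOFS =====

-- the peak test 'list1[k] > list1[k-1] and list1[k] > list1[k+1]' at Nat index k
def pkB (l : List Int) (k : Nat) : Bool :=
  decide (PySem.List.pyGetD l (k : Int) 0 > PySem.List.pyGetD l ((k : Int) - 1) 0 ∧
          PySem.List.pyGetD l (k : Int) 0 > PySem.List.pyGetD l ((k : Int) + 1) 0)

-- index of the last peak strictly below m
def lpIdx (l : List Int) : Nat → Option Nat
  | 0 => none
  | m + 1 => if pkB l m then some m else lpIdx l m

-- value of the last peak strictly below m (0 if none)
def cur0 (l : List Int) (m : Nat) : Int :=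
  match lpIdx l m with
  | some p => l.getD p 0
  | none => 0

-- no peak with index in [a, k]
def NoPk (l : List Int) (a k : Nat) : Prop := ∀ q, a ≤ q → q ≤ k → pkB l q = false

-- Bool form of 'a ≤ k ∧ k+1 < len ∧ NoPk a k' (the slots the inner fill writes)
def fillB (l : List Int) (a k : Nat) : Bool :=
  decide (a ≤ k) && decide (k + 1 < l.length) && (List.range' a (k + 1 - a)).all (fun q => !pkB l q)
-- A's list2 after the outer iterations with index < i have run (see outerSpec)
def gval (l : List Int) (i k : Nat) : Int :=
  if k + 1 = l.length then 0 else
  match lpIdx l (min (k + 1) i) with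
  | some p => if lpIdx l (k + 1) = some p then l.getD p 0 else 0
  | none => 0
theorem lpIdx_lt (l : List Int) (m p : Nat) (h : lpIdx l m = some p) : p < m := by
  induction m with
  | zero => simp [lpIdx] at h
  | succ m ih =>
    unfold lpIdx at h
    split at h
    · cases h; omega
    · exact Nat.lt_succ_of_lt (ih h)

theorem lpIdx_ext (l : List Int) (m m' : Nat) (hle : m ≤ m')
    (hno : ∀ q, m ≤ q → q < m' → pkB l q = false) : lpIdx l m' = lpIdx l m := by
  induction m' with
  | zero => have : m = 0 := by omega
            simp [this]
  | succ m' ih =>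
    rcases Nat.eq_or_lt_of_le hle with h | h
    · simp [h]
    · have hm : m ≤ m' := by omega
      rw [show lpIdx l (m' + 1) = if pkB l m' then some m' else lpIdx l m' from rfl]
      rw [hno m' hm (by omega)]
      simp [ih hm (fun q hq hq' => hno q hq (by omega))]

theorem lpIdx_ge_of_pk (l : List Int) (q m : Nat) (hq : pkB l q = true) (hlt : q < m) :
    ∃ p, lpIdx l m = some p ∧ q ≤ p := by
  induction m with
  | zero => omega
  | succ m ih =>
    rw [show lpIdx l (m + 1) = if pkB l m then some m else lpIdx l m from rfl]
    by_cases hp : pkB l m = true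
    · exact ⟨m, by simp [hp], by omega⟩
    · have hqm : q < m := by
        rcases Nat.lt_succ_iff_lt_or_eq.mp hlt with h | h
        · exact h
        · subst h; simp [hq] at hp
      obtain ⟨p, h1, h2⟩ := ih hqm
      exact ⟨p, by simp [hp, h1], h2⟩

theorem fillB_iff (l : List Int) (a k : Nat) :
    fillB l a k = true ↔ a ≤ k ∧ k + 1 < l.length ∧ NoPk l a k := by
  unfold fillB NoPk
  simp only [Bool.and_eq_true, decide_eq_true_eq, List.all_eq_true, List.mem_range'_1,
    Bool.not_eq_true', and_assoc]
  constructor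
  · rintro ⟨h1, h2, h3⟩
    exact ⟨h1, h2, fun q hq hq' => h3 q ⟨hq, by omega⟩⟩
  · rintro ⟨h1, h2, h3⟩
    exact ⟨h1, h2, fun q ⟨hq, hq'⟩ => h3 q hq (by omega)⟩
theorem cur0_succ (l : List Int) (a : Nat) :
    cur0 l (a + 1) = if pkB l a then l.getD a 0 else cur0 l a := by
  unfold cur0
  rw [show lpIdx l (a + 1) = if pkB l a then some a else lpIdx l a from rfl]
  by_cases h : pkB l a = true <;> simp [h]

theorem bSpec (l : List Int) : ∀ (c a : Nat) (out : List Int), a + c + 1 = l.length →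
    hspBLoop l (PySem.List.pyRange (a : Int) ((l.length : Int) - 1) 1) (cur0 l a) out
      = out ++ (List.range' a c).map (fun k => cur0 l (k + 1)) := by
  intro c
  induction c with
  | zero =>
    intro a out h
    rw [PySem.List.pyRange_one_eq_nil (by omega)]
    simp [hspBLoop]
  | succ c ih =>
    intro a out h
    rw [PySem.List.pyRange_one_cons (by omega)]
    simp only [hspBLoop]
    have hcast : (a : Int) + 1 = ((a + 1 : Nat) : Int) := by push_cast; ring
    by_cases hc : pkB l a = true
    · have hp : PySem.List.pyGetD l (a : Int) 0 > PySem.List.pyGetD l ((a : Int) - 1) 0 ∧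
          PySem.List.pyGetD l (a : Int) 0 > PySem.List.pyGetD l ((a : Int) + 1) 0 := by
        simpa [pkB] using hc
      rw [if_pos hp]
      have hv : PySem.List.pyGetD l (a : Int) 0 = cur0 l (a + 1) := by
        rw [cur0_succ, if_pos hc]; simp
      rw [hv, hcast, ih (a + 1) _ (by omega)]
      rw [List.range'_succ]
      simp
    · have hp : ¬(PySem.List.pyGetD l (a : Int) 0 > PySem.List.pyGetD l ((a : Int) - 1) 0 ∧
          PySem.List.pyGetD l (a : Int) 0 > PySem.List.pyGetD l ((a : Int) + 1) 0) := by
        simpa [pkB] using hc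
      rw [if_neg hp]
      have hv : cur0 l a = cur0 l (a + 1) := by
        rw [cur0_succ, if_neg (by simp [hc])]
      rw [hv, hcast, ih (a + 1) _ (by omega)]
      rw [List.range'_succ]
      simp
theorem fillB_false_of_pk (l : List Int) (a k : Nat) (ha : pkB l a = true) :
    fillB l a k = false := by
  rw [← Bool.not_eq_true, fillB_iff]
  rintro ⟨h1, h2, h3⟩
  exact absurd (h3 a le_rfl h1) (by simp [ha])

theorem fillB_false_of_lt (l : List Int) (a k : Nat) (hk : k < a) :
    fillB l a k = false := by
  rw [← Bool.not_eq_true, fillB_iff]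
  rintro ⟨h1, _, _⟩; omega

theorem fillB_false_of_last (l : List Int) (a k : Nat) (hk : l.length ≤ k + 1) :
    fillB l a k = false := by
  rw [← Bool.not_eq_true, fillB_iff]
  rintro ⟨_, h2, _⟩; omega

theorem fillB_false_of_a_ge (l : List Int) (a k : Nat) (h : l.length ≤ a + 1) :
    fillB l a k = false := by
  rw [← Bool.not_eq_true, fillB_iff]
  rintro ⟨h1, h2, _⟩; omega

theorem fillB_step (l : List Int) (a k : Nat) (ha : pkB l a = false) (hk : a < k) :
    fillB l (a + 1) k = fillB l a k := by
  rcases Bool.eq_false_or_eq_true (fillB l a k) with h | h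
  · rw [h, fillB_iff]
    rw [fillB_iff] at h
    obtain ⟨h1, h2, h3⟩ := h
    exact ⟨by omega, h2, fun q hq hq' => h3 q (by omega) hq'⟩
  · rw [h, ← Bool.not_eq_true, fillB_iff]
    rintro ⟨h1, h2, h3⟩
    rw [← Bool.not_eq_true, fillB_iff] at h
    exact h ⟨by omega, h2, fun q hq hq' => by
      rcases Nat.eq_or_lt_of_le hq with rfl | h'
      · exact ha
      · exact h3 q (by omega) hq'⟩

theorem getD_set_self (M : List Int) (n : Nat) (v : Int) (h : n < M.length) :
    (M.set n v).getD n 0 = v := by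
  simp [List.getD_eq_getElem?_getD, h]

theorem getD_set_ne (M : List Int) (n k : Nat) (v : Int) (h : k ≠ n) :
    (M.set n v).getD k 0 = M.getD k 0 := by
  simp [List.getD_eq_getElem?_getD, Ne.symm h]

theorem innerSpec (l : List Int) (i : Nat) : ∀ (c j : Nat) (M : List Int),
    M.length = l.length → i + j + c = l.length → 1 ≤ j →
    (hspAInner l (i : Int) (PySem.List.pyRange (j : Int) ((l.length : Int) - (i : Int)) 1) M).length = l.length ∧
    ∀ k, k < l.length →
      (hspAInner l (i : Int) (PySem.List.pyRange (j : Int) ((l.length : Int) - (i : Int)) 1) M).getD k 0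
        = if fillB l (i + j) k then l.getD i 0 else M.getD k 0 := by
  intro c
  induction c with
  | zero =>
    intro j M hM hlen hj
    rw [PySem.List.pyRange_one_eq_nil (by omega)]
    refine ⟨by simpa [hspAInner] using hM, fun k hk => ?_⟩
    rw [fillB_false_of_lt l (i + j) k (by omega)]
    simp [hspAInner]
  | succ c ih =>
    intro j M hM hlen hj
    rw [PySem.List.pyRange_one_cons (by omega)]
    simp only [hspAInner, PySem.List.len_eq]
    have hcast : (i : Int) + (j : Int) = ((i + j : Nat) : Int) := by push_cast; ring
    have hcast1 : (j : Int) + 1 = ((j + 1 : Nat) : Int) := by push_cast; ring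
    by_cases hlast : (i : Int) + (j : Int) = (l.length : Int) - 1
    · rw [if_pos hlast, hcast1]
      obtain ⟨hL, hV⟩ := ih (j + 1) M hM (by omega) (by omega)
      refine ⟨hL, fun k hk => ?_⟩
      rw [hV k hk, fillB_false_of_a_ge l (i + (j + 1)) k (by omega),
        fillB_false_of_a_ge l (i + j) k (by omega)]
    · rw [if_neg hlast]
      by_cases hc : pkB l (i + j) = true
      · have hp : PySem.List.pyGetD l ((i : Int) + (j : Int)) 0 > PySem.List.pyGetD l ((i : Int) + (j : Int) - 1) 0 ∧
            PySem.List.pyGetD l ((i : Int) + (j : Int)) 0 > PySem.List.pyGetD l ((i : Int) + (j : Int) + 1) 0 := by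
          rw [hcast]; simpa [pkB] using hc
        rw [if_pos hp]
        refine ⟨hM, fun k hk => ?_⟩
        rw [fillB_false_of_pk l (i + j) k hc]
        simp
      · have hp : ¬(PySem.List.pyGetD l ((i : Int) + (j : Int)) 0 > PySem.List.pyGetD l ((i : Int) + (j : Int) - 1) 0 ∧
            PySem.List.pyGetD l ((i : Int) + (j : Int)) 0 > PySem.List.pyGetD l ((i : Int) + (j : Int) + 1) 0) := by
          rw [hcast]; simpa [pkB] using hc
        rw [if_neg hp]
        have hc' : pkB l (i + j) = false := by simpa using hc
        set M' := PySem.List.pySetD M ((i : Int) + (j : Int)) (PySem.List.pyGetD l (i : Int) 0) with hM'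
        have hM'eq : M' = M.set (i + j) (l.getD i 0) := by
          rw [hM', hcast]
          simp only [PySem.List.pySetD_natCast, PySem.List.pyGetD_natCast]
        have hM'len : M'.length = l.length := by rw [hM'eq]; simpa using hM
        rw [hcast1]
        obtain ⟨hL, hV⟩ := ih (j + 1) M' hM'len (by omega) (by omega)
        refine ⟨hL, fun k hk => ?_⟩
        rw [hV k hk]
        rw [show i + (j + 1) = (i + j) + 1 from rfl]
        by_cases hkij : k = i + j
        · subst hkij
          rw [fillB_false_of_lt l (i + j + 1) (i + j) (by omega)]
          have hfill : fillB l (i + j) (i + j) = true := by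
            rw [fillB_iff]
            refine ⟨le_rfl, by omega, fun q hq hq' => ?_⟩
            have : q = i + j := by omega
            subst this; exact hc'
          rw [hfill, if_pos rfl, if_neg (by simp), hM'eq,
            getD_set_self M (i + j) (l.getD i 0) (by omega)]
        · have hMk : M'.getD k 0 = M.getD k 0 := by
            rw [hM'eq]; exact getD_set_ne M (i + j) k _ hkij
          rw [hMk]
          by_cases hlt : k < i + j
          · rw [fillB_false_of_lt l (i + j + 1) k (by omega),
              fillB_false_of_lt l (i + j) k (by omega)]
          · rw [fillB_step l (i + j) k hc' (by omega)]
theorem lpIdx_succ_pk (l : List Int) (i : Nat) (h : pkB l i = true) :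
    lpIdx l (i + 1) = some i := by
  rw [show lpIdx l (i + 1) = if pkB l i then some i else lpIdx l i from rfl, if_pos h]

theorem lpIdx_succ_nopk (l : List Int) (i : Nat) (h : pkB l i = false) :
    lpIdx l (i + 1) = lpIdx l i := by
  rw [show lpIdx l (i + 1) = if pkB l i then some i else lpIdx l i from rfl, if_neg (by simp [h])]

theorem gval_last (l : List Int) (i k : Nat) (h : k + 1 = l.length) : gval l i k = 0 := by
  simp [gval, h]

theorem gval_zero (l : List Int) (k : Nat) : gval l 0 k = 0 := by
  unfold gval
  split
  · rfl
  · simp [lpIdx]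

theorem gval_final (l : List Int) (k : Nat) (hk : k < l.length) (hne : k + 1 ≠ l.length) :
    gval l l.length k = cur0 l (k + 1) := by
  unfold gval cur0
  rw [if_neg hne, Nat.min_eq_left (by omega)]
  cases h : lpIdx l (k + 1) <;> simp

theorem gval_skip (l : List Int) (i k : Nat) (hi : i + 1 = l.length) (hk : k < l.length) :
    gval l (i + 1) k = gval l i k := by
  by_cases h : k + 1 = l.length
  · rw [gval_last l _ k h, gval_last l _ k h]
  · unfold gval
    rw [if_neg h, if_neg h, Nat.min_eq_left (by omega), Nat.min_eq_left (by omega)]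

theorem gval_nopk (l : List Int) (i k : Nat) (hc : pkB l i = false) :
    gval l (i + 1) k = gval l i k := by
  by_cases h : k + 1 = l.length
  · rw [gval_last l _ k h, gval_last l _ k h]
  · by_cases hki : k < i
    · unfold gval
      rw [if_neg h, if_neg h, Nat.min_eq_left (by omega), Nat.min_eq_left (by omega)]
    · unfold gval
      rw [if_neg h, if_neg h, Nat.min_eq_right (by omega), Nat.min_eq_right (by omega),
        lpIdx_succ_nopk l i hc]

-- the state after a peak-step of the outer loop is gval (i+1)
theorem gval_pk_step (l : List Int) (i k : Nat) (L : List Int)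
    (hc : pkB l i = true) (hiL : i < l.length) (hine : i + 1 ≠ l.length)
    (hLlen : L.length = l.length) (hk : k < l.length)
    (hLv : L.getD k 0 = gval l i k) :
    (if fillB l (i + 1) k then l.getD i 0 else (L.set i (l.getD i 0)).getD k 0)
      = gval l (i + 1) k := by
  have hi1 : i + 1 < l.length := by omega
  by_cases hkl : k + 1 = l.length
  · rw [fillB_false_of_last l (i + 1) k (by omega)]
    simp only [Bool.false_eq_true, if_false]
    rw [getD_set_ne L i k _ (by omega), hLv, gval_last l i k hkl, gval_last l (i + 1) k hkl]
  · have hkl' : k + 1 < l.length := by omega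
    by_cases hki : k = i
    · subst hki
      rw [fillB_false_of_lt l (k + 1) k (by omega)]
      simp only [Bool.false_eq_true, if_false]
      rw [getD_set_self L k (l.getD k 0) (by omega)]
      unfold gval
      rw [if_neg hkl, Nat.min_self, lpIdx_succ_pk l k hc]
      simp
    · by_cases hlt : k < i
      · rw [fillB_false_of_lt l (i + 1) k (by omega)]
        simp only [Bool.false_eq_true, if_false]
        rw [getD_set_ne L i k _ hki, hLv]
        unfold gval
        rw [if_neg hkl, if_neg hkl, Nat.min_eq_left (by omega), Nat.min_eq_left (by omega)]
      · have hik : i < k := by omega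
        by_cases hf : fillB l (i + 1) k = true
        · rw [hf]
          simp only [if_true]
          rw [fillB_iff] at hf
          obtain ⟨_, _, hno⟩ := hf
          unfold gval
          rw [if_neg hkl, Nat.min_eq_right (by omega),
            lpIdx_ext l (i + 1) (k + 1) (by omega) (fun q hq hq' => hno q hq (by omega)),
            lpIdx_succ_pk l i hc]
          simp
        · rw [Bool.not_eq_true] at hf
          rw [hf]
          simp only [Bool.false_eq_true, if_false]
          rw [getD_set_ne L i k _ hki, hLv]
          have hex : ∃ q, i + 1 ≤ q ∧ q ≤ k ∧ pkB l q = true := by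
            by_contra hcon
            push_neg at hcon
            have : fillB l (i + 1) k = true := by
              rw [fillB_iff]
              exact ⟨by omega, hkl', fun q hq hq' => Bool.eq_false_iff.mpr (hcon q hq hq')⟩
            rw [this] at hf; cases hf
          obtain ⟨q, hq1, hq2, hq3⟩ := hex
          obtain ⟨p, hp1, hp2⟩ := lpIdx_ge_of_pk l q (k + 1) hq3 (by omega)
          unfold gval
          rw [if_neg hkl, if_neg hkl, Nat.min_eq_right (by omega), Nat.min_eq_right (by omega),
            lpIdx_succ_pk l i hc, hp1]
          have hne2 : ¬(some p = some i) := by simp; omega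
          cases hli : lpIdx l i with
          | none => simp [hne2]
          | some p' =>
            have hlt' := lpIdx_lt l i p' hli
            have : ¬(some p = some p') := by simp; omega
            simp [this, hne2]
theorem outerSpec (l : List Int) : ∀ (c i : Nat) (L : List Int), i + c = l.length →
    L.length = l.length → (∀ k, k < l.length → L.getD k 0 = gval l i k) →
    (hspAOuter l (PySem.List.pyRange (i : Int) (l.length : Int) 1) L).length = l.length ∧
    ∀ k, k < l.length →
      (hspAOuter l (PySem.List.pyRange (i : Int) (l.length : Int) 1) L).getD k 0 = gval l l.length k := by
  intro c
  induction c with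
  | zero =>
    intro i L hlen hL hV
    have : i = l.length := by omega
    subst this
    rw [PySem.List.pyRange_one_eq_nil (by omega)]
    exact ⟨by simpa [hspAOuter] using hL, fun k hk => by simpa [hspAOuter] using hV k hk⟩
  | succ c ih =>
    intro i L hlen hL hV
    rw [PySem.List.pyRange_one_cons (by omega)]
    simp only [hspAOuter, PySem.List.len_eq]
    have hcast1 : (i : Int) + 1 = ((i + 1 : Nat) : Int) := by push_cast; ring
    by_cases hlast : (i : Int) = (l.length : Int) - 1
    · rw [if_pos hlast, hcast1]
      exact ih (i + 1) L (by omega) hL (fun k hk => by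
        rw [hV k hk, gval_skip l i k (by omega) hk])
    · rw [if_neg hlast]
      by_cases hc : pkB l i = true
      · have hp : PySem.List.pyGetD l (i : Int) 0 > PySem.List.pyGetD l ((i : Int) - 1) 0 ∧
            PySem.List.pyGetD l (i : Int) 0 > PySem.List.pyGetD l ((i : Int) + 1) 0 := by
          simpa [pkB] using hc
        rw [if_pos hp]
        have hMeq : PySem.List.pySetD L (i : Int) (PySem.List.pyGetD l (i : Int) 0)
            = L.set i (l.getD i 0) := by
          simp only [PySem.List.pySetD_natCast, PySem.List.pyGetD_natCast]
        rw [hMeq]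
        obtain ⟨hL', hV'⟩ := innerSpec l i (l.length - i - 1) 1 (L.set i (l.getD i 0))
          (by simpa using hL) (by omega) le_rfl
        simp only [Nat.cast_one] at hL' hV'
        rw [hcast1]
        exact ih (i + 1) _ (by omega) hL' (fun k hk => by
          rw [hV' k hk]
          exact gval_pk_step l i k L hc (by omega) (by omega) hL hk (hV k hk))
      · have hp : ¬(PySem.List.pyGetD l (i : Int) 0 > PySem.List.pyGetD l ((i : Int) - 1) 0 ∧
            PySem.List.pyGetD l (i : Int) 0 > PySem.List.pyGetD l ((i : Int) + 1) 0) := by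
          simpa [pkB] using hc
        rw [if_neg hp, hcast1]
        exact ih (i + 1) L (by omega) hL (fun k hk => by
          rw [hV k hk, gval_nopk l i k (by simpa using hc)])
theorem hsp_asi_spec : Claim_equal_hsp_asi := by
  intro df l _
  unfold Spec_hsp_asi hsp_asi hsp_asi_alt
  by_cases hnil : l = []
  · subst hnil; rfl
  · have hlen : 1 ≤ l.length := List.length_pos_iff.mpr hnil
    obtain ⟨hL, hV⟩ := outerSpec l l.length 0 (List.replicate l.length 0) (by omega)
      (by simp) (fun k hk => by
        rw [gval_zero]
        simp [List.getD_eq_getElem?_getD, hk])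
    simp only [Nat.cast_zero] at hL hV
    have hB := bSpec l (l.length - 1) 0 []
      (by omega)
    simp only [Nat.cast_zero] at hB
    have hcur : cur0 l 0 = 0 := rfl
    rw [hcur] at hB
    simp only [PySem.List.len_eq, if_neg hnil]
    rw [hB]
    simp only [List.nil_append]
    set R := hspAOuter l (PySem.List.pyRange 0 (l.length : Int) 1) (List.replicate l.length 0) with hR
    apply List.ext_getElem
    · rw [hL]; simp; omega
    · intro k hk1 hk2
      have hkl : k < l.length := by rwa [hL] at hk1
      have hRk : R[k] = R.getD k 0 := by
        simp [List.getD_eq_getElem?_getD, List.getElem?_eq_getElem hk1]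
      rw [hRk, hV k hkl]
      by_cases hlast : k + 1 = l.length
      · rw [gval_last l _ k hlast]
        rw [List.getElem_append_right (by simp; omega)]
        simp
      · rw [gval_final l k hkl hlast]
        rw [List.getElem_append_left (by simp; omega)]
        simp [List.getElem_range']
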